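-- pv_equiv track=rewrite | github.com/r4huL-cyber/HASHfinder | hashfinder.py | is_atbash
-- ===== SOURCE A (Python) =====
-- def is_atbash(text):
--     def atbash(char):
--         if char.isupper():
--             return chr(65 + (25 - (ord(char) - 65)))
--         elif char.islower():
--             return chr(97 + (25 - (ord(char) - 97)))
--         return char
--     reversed_text = ''.join(atbash(c) for c in text)
--     return reversed_text != text and reversed_text.isprintable()
-- ===== SOURCE B (Python) =====
-- def is_atbash(text):
--     # Decide the answer in one scan without building the transformed string:
--     # on the ASCII domain Atbash maps every letter to a DIFFERENT letter (no
--     # fixed point, and letters are always printable) and leaves every other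
--     # character unchanged.  So the transform changes the text iff some letter
--     # occurs, and the transformed text is printable iff every non-letter
--     # character is printable.
--     changed = False
--     for c in text:
--         if c.isupper() or c.islower():
--             changed = True
--         elif not c.isprintable():
--             return False
--     return changed
-- ===== Notes on version B (the rewrite author's own statement) =====
-- stated objective: faster
-- what changed: B never builds the transformed string: a single early-exit scan decides the result directly, using the facts that on ASCII Atbash maps every letter to a different printable letter and fixes every other character, so B only tests for a letter and for non-printable non-letters.
import Mathlib
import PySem

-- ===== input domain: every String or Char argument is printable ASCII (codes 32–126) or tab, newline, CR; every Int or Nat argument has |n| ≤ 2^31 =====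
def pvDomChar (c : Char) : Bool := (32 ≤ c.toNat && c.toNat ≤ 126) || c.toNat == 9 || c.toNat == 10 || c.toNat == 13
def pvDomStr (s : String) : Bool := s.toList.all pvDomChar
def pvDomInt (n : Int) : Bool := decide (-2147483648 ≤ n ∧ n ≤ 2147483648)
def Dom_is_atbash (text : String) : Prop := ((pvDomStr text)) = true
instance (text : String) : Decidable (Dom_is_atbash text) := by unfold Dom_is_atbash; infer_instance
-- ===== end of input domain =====

-- B decides the result in one early-exit scan without building the transformed string
-- (Atbash has no fixed point on letters and fixes non-letters); objective: faster (measured).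

-- ===== PORT A =====
-- str.isprintable: hand port, exact on the printable-ASCII+tab/newline/CR domain
-- (there a char is printable iff 32 ≤ code ≤ 126; the empty string is printable).
def pvIsPrintable (cs : List Char) : Bool := cs.all (fun c => 32 ≤ c.toNat && c.toNat ≤ 126)

-- A's inner helper atbash(char); isupper/islower via PySem (exact on the ASCII domain)
def pvAtbashChar (c : Char) : Char :=
  if PySem.Chars.isupper c then Char.ofNat (65 + (25 - (c.toNat - 65)))
  else if PySem.Chars.islower c then Char.ofNat (97 + (25 - (c.toNat - 97)))
  else c

def is_atbash (text : String) : Bool :=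
  -- reversed_text = ''.join(atbash(c) for c in text), kept as its char list
  let reversed_text : List Char := text.toList.map pvAtbashChar
  decide (reversed_text ≠ text.toList) && pvIsPrintable reversed_text

-- ===== PORT B =====
-- c.isprintable() on one char: hand port, exact on the ASCII domain (32 ≤ code ≤ 126)
def pvPrintChar (c : Char) : Bool := 32 ≤ c.toNat && c.toNat ≤ 126

-- B's for-loop with its `changed` accumulator and the early `return False`
def pvAltLoop : List Char → Bool → Bool
  | [], changed => changed
  | c :: rest, changed =>
    if PySem.Chars.isupper c || PySem.Chars.islower c then pvAltLoop rest true
    else if !(pvPrintChar c) then false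
    else pvAltLoop rest changed

def is_atbash_alt (text : String) : Bool := pvAltLoop text.toList false

-- ===== PRECONDITION & SPEC =====
def Spec_is_atbash (text : String) (out : Bool) : Prop := out = is_atbash_alt text
instance (text : String) (out : Bool) : Decidable (Spec_is_atbash text out) := by unfold Spec_is_atbash; infer_instance

-- ===== CLAIM (what is proved, stated in full; the proofs are below) =====
def Claim_equal_is_atbash : Prop := ∀ (text : String), Dom_is_atbash text → Spec_is_atbash text (is_atbash text)

-- ===== LEMMAS AND PROOFS =====

-- per-char facts on the domain, checked by enumerating the 128 ASCII code points:
-- on a letter, atbash changes it and its image is printable; on a non-letter, atbash fixes it.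
def pvCharFact (c : Char) : Bool :=
  if PySem.Chars.isupper c || PySem.Chars.islower c then
    (pvAtbashChar c != c) && (32 ≤ (pvAtbashChar c).toNat && (pvAtbashChar c).toNat ≤ 126)
  else pvAtbashChar c == c

lemma pvCharFact_dom (c : Char) (h : pvDomChar c = true) : pvCharFact c = true := by
  have hlt : c.toNat < 128 := by
    simp [pvDomChar] at h
    omega
  have hval : (List.range 128).all (fun n => pvCharFact (Char.ofNat n)) = true := by
    set_option maxRecDepth 4096 in decide
  have := (List.all_eq_true.mp hval) c.toNat (List.mem_range.mpr hlt)
  rw [Char.ofNat_toNat c] at this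
  exact this

-- the loop computes A's formula, for any accumulator value
lemma pvAltLoop_spec (cs : List Char) (h : cs.all pvDomChar = true) (changed : Bool) :
    pvAltLoop cs changed
      = ((decide (cs.map pvAtbashChar ≠ cs) || changed) && pvIsPrintable (cs.map pvAtbashChar)) := by
  induction cs generalizing changed with
  | nil => simp [pvAltLoop, pvIsPrintable]
  | cons c rest ih =>
    simp only [List.all_cons, Bool.and_eq_true] at h
    obtain ⟨hc, hrest⟩ := h
    have hfact := pvCharFact_dom c hc
    unfold pvCharFact at hfact
    by_cases hl : (PySem.Chars.isupper c || PySem.Chars.islower c) = true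
    · rw [hl] at hfact
      have hsplit : (pvAtbashChar c != c) = true ∧ (32 ≤ (pvAtbashChar c).toNat && (pvAtbashChar c).toNat ≤ 126) = true := by
        constructor <;> [exact Bool.and_elim_left hfact; exact Bool.and_elim_right hfact]
      have h1 := hsplit.1
      have h2 := hsplit.2
      have hne : pvAtbashChar c ≠ c := by simpa using h1
      simp only [pvAltLoop, hl, if_true, ih hrest true, List.map_cons]
      have hlistne : decide ((pvAtbashChar c :: rest.map pvAtbashChar) ≠ (c :: rest)) = true := by
        simp [hne]
      simp [pvIsPrintable, h2]
      exact fun _ => Or.inl (Or.inl hne)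
    · rw [if_neg (by simp_all)] at hfact
      have hfix : pvAtbashChar c = c := by exact eq_of_beq hfact
      simp only [pvAltLoop, hl, Bool.false_eq_true, if_false, List.map_cons, hfix]
      by_cases hp : pvPrintChar c = true
      · rw [if_neg (by simp [hp]), ih hrest changed]
        have hhead : decide ((c :: rest.map pvAtbashChar) ≠ (c :: rest))
            = decide (rest.map pvAtbashChar ≠ rest) := by
          simp
        rw [hhead]
        simp only [pvIsPrintable, List.all_cons]
        unfold pvPrintChar at hp
        rw [hp]
        simp
      · rw [if_pos (by simp_all)]
        have : pvIsPrintable (c :: rest.map pvAtbashChar) = false := by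
          simp only [pvIsPrintable, List.all_cons]
          unfold pvPrintChar at hp
          simp [hp]
        rw [this]
        simp

-- ===== VERDICT (by name: the statement is the Claim_ definition above) =====
theorem is_atbash_spec : Claim_equal_is_atbash := by
  intro text hdom
  unfold Spec_is_atbash is_atbash is_atbash_alt
  rw [pvAltLoop_spec text.toList hdom false]
  simp
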